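-- pv_equiv track=rewrite | github.com/Danieldrapala/jfttcomp | comp.py | generate_const_and_Store
-- ===== SOURCE A (Python) =====
-- def generate_const_and_Store(num, memoryplace):
--     comm=""
--     if memoryplace != 0:
--         comm = "STORE " + str(memoryplace) + "\n"
--     if num != 0:
--         while num > 5 or num < -5:
--             if num % 2 == 0:
--                 num = num // 2
--                 comm = "SHIFT "+"1" + "\n" + comm
--             else:
--                 num = num - 1 if num > 0 else num +1
--                 comm = ("INC " + "\n" + comm if num > 0 else "DEC " + "\n" + comm)
--         for i in range(num-1 if num > 0 else -num -1):
--             comm = ("INC " + "\n" + comm if num > 0 else "DEC " + "\n" + comm)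
--         comm = ("INC " + "\n" + comm if num > 0 else "DEC " + "\n" + comm)
--     comm = "SUB 0 " + "\n" + comm
--     return comm
-- ===== SOURCE B (Python) =====
-- def _build(num):
--     """Instruction string that constructs num in the accumulator, in execution order."""
--     if -5 <= num <= 5:
--         return ("INC \n" if num > 0 else "DEC \n") * abs(num)
--     if num % 2 == 0:
--         return _build(num // 2) + "SHIFT 1\n"
--     if num > 0:
--         return _build(num - 1) + "INC \n"
--     return _build(num + 1) + "DEC \n"
--
-- def generate_const_and_Store(num, memoryplace):
--     store = "STORE " + str(memoryplace) + "\n" if memoryplace != 0 else ""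
--     body = _build(num) if num != 0 else ""
--     return "SUB 0 \n" + body + store
-- ===== Notes on version B (the rewrite author's own statement) =====
-- stated objective: simpler
-- what changed: Replaced A's state-mutating while/for loops that repeatedly prepend instructions to the front of the string by a recursive builder _build(num) that returns the construction-order instruction string directly and is appended once between the SUB prefix and the STORE suffix.
import Mathlib
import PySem

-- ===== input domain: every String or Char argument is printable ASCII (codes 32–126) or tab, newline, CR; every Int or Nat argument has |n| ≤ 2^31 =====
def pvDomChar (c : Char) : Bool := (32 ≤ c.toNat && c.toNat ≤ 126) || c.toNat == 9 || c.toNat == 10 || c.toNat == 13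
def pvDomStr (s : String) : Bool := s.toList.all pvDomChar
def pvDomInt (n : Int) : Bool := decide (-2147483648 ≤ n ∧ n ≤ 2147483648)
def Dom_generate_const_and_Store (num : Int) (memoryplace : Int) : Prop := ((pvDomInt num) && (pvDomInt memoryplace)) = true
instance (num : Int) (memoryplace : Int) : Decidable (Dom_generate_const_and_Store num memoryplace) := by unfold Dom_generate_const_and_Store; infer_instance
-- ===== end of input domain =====

-- B replaces A's prepend-to-the-front while/for loops by a recursive builder that
-- returns the construction-order instruction string directly (objective: simpler).

-- ===== PORT A =====
-- A's while loop: reduces num, prepending one instruction per step.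
-- fuel is only a totality guard: each iteration strictly decreases num.natAbs,
-- so fuel = num.natAbs (supplied below) is never exhausted.
def pvAWhile (fuel : Nat) (num : Int) (comm : String) : Int × String :=
  match fuel with
  | 0 => (num, comm)
  | f + 1 =>
    if num > 5 ∨ num < -5 then
      if PySem.Int.mod num 2 = 0 then
        pvAWhile f (PySem.Int.floordiv num 2) ("SHIFT " ++ "1" ++ "\n" ++ comm)
      else
        let num' := if num > 0 then num - 1 else num + 1
        pvAWhile f num' (if num' > 0 then "INC " ++ "\n" ++ comm else "DEC " ++ "\n" ++ comm)
    else (num, comm)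

def generate_const_and_Store (num : Int) (memoryplace : Int) : String :=
  let comm : String := ""
  let comm := if memoryplace ≠ 0 then "STORE " ++ PySem.Int.toStr memoryplace ++ "\n" else comm
  let comm :=
    if num ≠ 0 then
      let nc := pvAWhile num.natAbs num comm
      let n := nc.1
      let c := nc.2
      let c := (PySem.List.pyRange 0 (if n > 0 then n - 1 else -n - 1) 1).foldl
                 (fun c _ => if n > 0 then "INC " ++ "\n" ++ c else "DEC " ++ "\n" ++ c) c
      if n > 0 then "INC " ++ "\n" ++ c else "DEC " ++ "\n" ++ c
    else comm
  "SUB 0 " ++ "\n" ++ comm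

-- ===== PORT B =====
-- Source B's _build: the instruction string constructing num, in execution order.
-- fuel is again only a totality guard (each recursive call decreases num.natAbs).
def pvBuild (fuel : Nat) (num : Int) : String :=
  match fuel with
  | 0 => ""
  | f + 1 =>
    if -5 ≤ num ∧ num ≤ 5 then
      String.join (List.replicate num.natAbs (if num > 0 then "INC \n" else "DEC \n"))
    else if PySem.Int.mod num 2 = 0 then
      pvBuild f (PySem.Int.floordiv num 2) ++ "SHIFT 1\n"
    else if num > 0 then
      pvBuild f (num - 1) ++ "INC \n"
    else
      pvBuild f (num + 1) ++ "DEC \n"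

def generate_const_and_Store_alt (num : Int) (memoryplace : Int) : String :=
  let store := if memoryplace ≠ 0 then "STORE " ++ PySem.Int.toStr memoryplace ++ "\n" else ""
  let body := if num ≠ 0 then pvBuild num.natAbs num else ""
  "SUB 0 " ++ "\n" ++ (body ++ store)

-- ===== PRECONDITION & SPEC =====
def Spec_generate_const_and_Store (num : Int) (memoryplace : Int) (out : String) : Prop := out = generate_const_and_Store_alt num memoryplace
instance (num : Int) (memoryplace : Int) (out : String) : Decidable (Spec_generate_const_and_Store num memoryplace out) := by unfold Spec_generate_const_and_Store; infer_instance

-- ===== CLAIM (what is proved, stated in full; the proofs are below) =====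
def Claim_equal_generate_const_and_Store : Prop := ∀ (num : Int) (memoryplace : Int), Dom_generate_const_and_Store num memoryplace → Spec_generate_const_and_Store num memoryplace (generate_const_and_Store num memoryplace)

-- ===== LEMMAS AND PROOFS =====

-- A's trailing for-loop + final prepend, applied to the state the while loop leaves
def pvAFinish (nc : Int × String) : String :=
  let n := nc.1
  let c := nc.2
  let c := (PySem.List.pyRange 0 (if n > 0 then n - 1 else -n - 1) 1).foldl
             (fun c _ => if n > 0 then "INC " ++ "\n" ++ c else "DEC " ++ "\n" ++ c) c
  if n > 0 then "INC " ++ "\n" ++ c else "DEC " ++ "\n" ++ c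

theorem pv_join_cons : ∀ (l : List String) (s : String), String.join (s :: l) = s ++ String.join l := by
  intro l
  induction l with
  | nil => intro s; simp [String.join]
  | cons t l ih =>
      intro s
      have h1 : String.join (s :: t :: l) = String.join ((s ++ t) :: l) := by
        simp [String.join]
      rw [h1, ih, ih, String.append_assoc]

theorem pv_join_rep_comm : ∀ (n : Nat) (s : String),
    String.join (List.replicate n s) ++ s = s ++ String.join (List.replicate n s) := by
  intro n
  induction n with
  | zero => intro s; simp [String.join]
  | succ n ih =>
      intro s
      rw [List.replicate_succ, pv_join_cons, String.append_assoc, ih, ← String.append_assoc]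

theorem pv_fold_prepend (s : String) (l : List Int) :
    ∀ c : String, l.foldl (fun c _ => s ++ c) c
      = String.join (List.replicate l.length s) ++ c := by
  induction l with
  | nil => intro c; simp [String.join]
  | cons x xs ih =>
      intro c
      simp only [List.foldl_cons, List.length_cons, ih (s ++ c)]
      rw [List.replicate_succ, pv_join_cons, String.append_assoc,
          ← String.append_assoc (s₁ := String.join (List.replicate xs.length s)) (s₂ := s) (s₃ := c),
          pv_join_rep_comm, String.append_assoc]

theorem pv_key : ∀ (f : Nat) (num : Int), num.natAbs ≤ f → num ≠ 0 →
    ∀ comm : String, pvAFinish (pvAWhile f num comm) = pvBuild f num ++ comm := by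
  intro f
  induction f with
  | zero => intro num hf hne comm; omega
  | succ f ih =>
    intro num hf hne comm
    by_cases hbig : num > 5 ∨ num < -5
    · rw [pvAWhile, if_pos hbig, pvBuild, if_neg (by omega : ¬(-5 ≤ num ∧ num ≤ 5))]
      by_cases heven : PySem.Int.mod num 2 = 0
      · rw [if_pos heven, if_pos heven]
        have hfd : PySem.Int.floordiv num 2 = num / 2 :=
          PySem.Int.floordiv_eq_ediv_of_pos (by omega)
        have hle : (num / 2).natAbs ≤ f := by omega
        rw [hfd, ih _ hle (by omega)]
        have : ("SHIFT " ++ "1" ++ "\n" : String) = "SHIFT 1\n" := by decide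
        rw [this, String.append_assoc]
      · rw [if_neg heven, if_neg heven]
        by_cases hpos : num > 0
        · have h1 : (if num > 0 then num - 1 else num + 1) = num - 1 := if_pos hpos
          have h2 : num - 1 > 0 := by omega
          simp only [h1]
          rw [if_pos hpos, if_pos h2, ih (num - 1) (by omega) (by omega)]
          have : ("INC " ++ "\n" : String) = "INC \n" := by decide
          rw [this, String.append_assoc]
        · have h1 : (if num > 0 then num - 1 else num + 1) = num + 1 := if_neg hpos
          have h2 : ¬ num + 1 > 0 := by omega
          simp only [h1]
          rw [if_neg hpos, if_neg h2, ih (num + 1) (by omega) (by omega)]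
          have : ("DEC " ++ "\n" : String) = "DEC \n" := by decide
          rw [this, String.append_assoc]
    · -- base: |num| ≤ 5, num ≠ 0
      rw [pvAWhile, if_neg hbig, pvBuild, if_pos (by omega : -5 ≤ num ∧ num ≤ 5)]
      unfold pvAFinish
      simp only
      by_cases hpos : (num : Int) > 0
      · have hrange : (if num > 0 then num - 1 else -num - 1) = ((num.natAbs - 1 : Nat) : Int) := by
          rw [if_pos hpos]; omega
        rw [if_pos hpos, hrange]
        have hsimp : (fun (c : String) (_ : Int) => if num > 0 then "INC " ++ "\n" ++ c else "DEC " ++ "\n" ++ c)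
            = fun (c : String) (_ : Int) => "INC \n" ++ c := by
          funext c i; rw [if_pos hpos]; rfl
        rw [hsimp, pv_fold_prepend, if_pos hpos]
        have hlen : (PySem.List.pyRange 0 ((num.natAbs - 1 : Nat) : Int) 1).length = num.natAbs - 1 := by
          simp [pysem]
        rw [hlen]
        have : ("INC " ++ "\n" : String) = "INC \n" := by decide
        rw [this]
        have hrep : num.natAbs = (num.natAbs - 1) + 1 := by omega
        rw [hrep, List.replicate_succ, pv_join_cons, String.append_assoc, Nat.add_sub_cancel]
      · have hrange : (if num > 0 then num - 1 else -num - 1) = ((num.natAbs - 1 : Nat) : Int) := by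
          rw [if_neg hpos]; omega
        rw [if_neg hpos, hrange]
        have hsimp : (fun (c : String) (_ : Int) => if num > 0 then "INC " ++ "\n" ++ c else "DEC " ++ "\n" ++ c)
            = fun (c : String) (_ : Int) => "DEC \n" ++ c := by
          funext c i; rw [if_neg hpos]; rfl
        rw [hsimp, pv_fold_prepend, if_neg hpos]
        have hlen : (PySem.List.pyRange 0 ((num.natAbs - 1 : Nat) : Int) 1).length = num.natAbs - 1 := by
          simp [pysem]
        rw [hlen]
        have : ("DEC " ++ "\n" : String) = "DEC \n" := by decide
        rw [this]
        have hrep : num.natAbs = (num.natAbs - 1) + 1 := by omega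
        rw [hrep, List.replicate_succ, pv_join_cons, String.append_assoc, Nat.add_sub_cancel]

-- ===== VERDICT (by name: the statement is the Claim_ definition above) =====
theorem generate_const_and_Store_spec : Claim_equal_generate_const_and_Store := by
  intro num memoryplace _
  unfold Spec_generate_const_and_Store generate_const_and_Store generate_const_and_Store_alt
  simp only
  by_cases hnum : num ≠ 0
  · rw [if_pos hnum, if_pos hnum]
    have := pv_key num.natAbs num (le_refl _) hnum
      (if memoryplace ≠ 0 then "STORE " ++ PySem.Int.toStr memoryplace ++ "\n" else "")
    unfold pvAFinish at this
    simp only at this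
    rw [this]
  · rw [if_neg hnum, if_neg hnum]
    simp
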